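-- pv_equiv track=rewrite | github.com/likhonsdevbd/github-automation-hub | analytics_orchestrator/api/routes/monitoring.py | _determine_overall_status
-- ===== SOURCE A (Python) =====
-- from typing import Dict, Any, List, Optional
--
-- def _determine_overall_status(component_health: Dict[str, Dict], pipeline_health: Dict[str, Any]) -> str:
--     """Determine overall system status"""
--     try:
--         # Check for critical failures
--         failed_components = sum(1 for c in component_health.values() if c.get('status') == 'failed')
--         if failed_components > 0:
--             return 'critical'
--
--         # Check degraded components
--         degraded_components = sum(1 for c in component_health.values() if c.get('status') == 'degraded')
--
--         # Check data pipeline health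
--         pipeline_healthy = pipeline_health.get('healthy', False)
--
--         # Determine status
--         if pipeline_healthy and degraded_components == 0:
--             healthy_components = sum(1 for c in component_health.values() if c.get('status') == 'healthy')
--             if healthy_components == len(component_health):
--                 return 'healthy'
--             else:
--                 return 'degraded'
--         elif pipeline_healthy and degraded_components < len(component_health) / 2:
--             return 'degraded'
--         else:
--             return 'critical'
--
--     except Exception:
--         return 'unknown'
-- ===== SOURCE B (Python) =====
-- def _determine_overall_status(component_health, pipeline_health):
--     """Single early-exit scan with accumulators, then a flattened decision."""
--     try:
--         degraded = 0
--         healthy = 0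
--         for c in component_health.values():
--             s = c.get('status')
--             if s == 'failed':
--                 return 'critical'      # early exit: any failure is critical
--             if s == 'degraded':
--                 degraded += 1
--             elif s == 'healthy':
--                 healthy += 1
--         if not pipeline_health.get('healthy', False):
--             return 'critical'          # pipeline down dominates both remaining branches
--         n = len(component_health)
--         if degraded == 0:
--             return 'healthy' if healthy == n else 'degraded'
--         return 'degraded' if 2 * degraded < n else 'critical'
--     except Exception:
--         return 'unknown'
-- ===== Notes on version B (the rewrite author's own statement) =====
-- stated objective: alternative
-- what changed: B makes one early-exit pass over the components accumulating degraded/healthy counts (returning 'critical' immediately on the first 'failed'), then uses a flattened decision with the unhealthy-pipeline case hoisted out, instead of A's three full generator scans feeding a nested branch cascade.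
import Mathlib
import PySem

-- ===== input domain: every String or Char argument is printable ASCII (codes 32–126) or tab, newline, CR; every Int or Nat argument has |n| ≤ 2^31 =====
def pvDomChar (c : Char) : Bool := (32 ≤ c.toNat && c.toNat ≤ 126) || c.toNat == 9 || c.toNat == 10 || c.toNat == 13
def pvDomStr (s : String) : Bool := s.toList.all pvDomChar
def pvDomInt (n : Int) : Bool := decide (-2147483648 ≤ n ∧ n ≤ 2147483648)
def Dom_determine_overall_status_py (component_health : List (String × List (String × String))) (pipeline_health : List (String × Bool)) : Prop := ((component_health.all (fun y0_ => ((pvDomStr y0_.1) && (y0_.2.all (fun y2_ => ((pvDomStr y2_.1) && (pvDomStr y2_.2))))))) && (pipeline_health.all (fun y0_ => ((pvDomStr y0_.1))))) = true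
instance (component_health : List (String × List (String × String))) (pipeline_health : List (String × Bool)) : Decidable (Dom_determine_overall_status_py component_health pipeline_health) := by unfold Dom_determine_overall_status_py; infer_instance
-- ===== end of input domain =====

-- B: one early-exit scan with degraded/healthy accumulators and a flattened decision, vs A's three full scans and nested cascade (alternative; not claimed faster).
-- ===== PORT A =====
-- c.get('status'): first-match lookup in the component's dict
def pvStatus (c : List (String × String)) : Option String :=
  PySem.Dict.get? (PySem.Dict.mk c) "status"

def determine_overall_status_py (component_health : List (String × List (String × String))) (pipeline_health : List (String × Bool)) : String :=
  let failed_components : Int := (component_health.map (fun c => if pvStatus c.2 == some "failed" then (1:Int) else 0)).sum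
  if failed_components > 0 then "critical"
  else
    let degraded_components : Int := (component_health.map (fun c => if pvStatus c.2 == some "degraded" then (1:Int) else 0)).sum
    let pipeline_healthy := PySem.Dict.getD (PySem.Dict.mk pipeline_health) "healthy" false
    if pipeline_healthy && (degraded_components == 0) then
      let healthy_components : Int := (component_health.map (fun c => if pvStatus c.2 == some "healthy" then (1:Int) else 0)).sum
      if healthy_components == (component_health.length : Int) then "healthy" else "degraded"
    -- 'degraded < len/2' with Python float '/': exact as '2*degraded < len' for these integer counts
    else if pipeline_healthy && decide (2 * degraded_components < (component_health.length : Int)) then "degraded"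
    else "critical"

-- ===== PORT B =====
-- B's loop with early return: 'none' = returned 'critical' on a 'failed' component,
-- 'some (degraded, healthy)' = loop finished with these accumulators.
def pvScan : List (String × List (String × String)) → Option (Int × Int)
  | [] => some (0, 0)
  | c :: rest =>
    let s := pvStatus c.2
    if s == some "failed" then none
    else
      match pvScan rest with
      | none => none
      | some (d, h) =>
        if s == some "degraded" then some (d + 1, h)
        else if s == some "healthy" then some (d, h + 1)
        else some (d, h)

def determine_overall_status_py_alt (component_health : List (String × List (String × String))) (pipeline_health : List (String × Bool)) : String :=
  match pvScan component_health with
  | none => "critical"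
  | some (degraded, healthy) =>
    if !(PySem.Dict.getD (PySem.Dict.mk pipeline_health) "healthy" false) then "critical"
    else
      let n : Int := component_health.length
      if degraded == 0 then (if healthy == n then "healthy" else "degraded")
      else if decide (2 * degraded < n) then "degraded" else "critical"

-- ===== PRECONDITION & SPEC =====
def Spec_determine_overall_status_py (component_health : List (String × List (String × String))) (pipeline_health : List (String × Bool)) (out : String) : Prop := out = determine_overall_status_py_alt component_health pipeline_health
instance (component_health : List (String × List (String × String))) (pipeline_health : List (String × Bool)) (out : String) : Decidable (Spec_determine_overall_status_py component_health pipeline_health out) := by unfold Spec_determine_overall_status_py; infer_instance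

-- ===== CLAIM (what is proved, stated in full; the proofs are below) =====
def Claim_equal_determine_overall_status_py : Prop := ∀ (component_health : List (String × List (String × String))) (pipeline_health : List (String × Bool)), Dom_determine_overall_status_py component_health pipeline_health → Spec_determine_overall_status_py component_health pipeline_health (determine_overall_status_py component_health pipeline_health)

-- ===== LEMMAS AND PROOFS =====
-- abbreviations for A's three 0/1 sums
def pvCnt (s : String) (ch : List (String × List (String × String))) : Int :=
  (ch.map (fun c => if pvStatus c.2 == some s then (1:Int) else 0)).sum

theorem pvCnt_nonneg (s : String) (ch : List (String × List (String × String))) : 0 ≤ pvCnt s ch := by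
  induction ch with
  | nil => simp [pvCnt]
  | cons c rest ih =>
    simp only [pvCnt, List.map_cons, List.sum_cons] at *
    split <;> omega

-- pvScan characterised by A's sums: it is none iff some component failed,
-- and otherwise returns exactly (degraded count, healthy count).
theorem pvScan_spec (ch : List (String × List (String × String))) :
    pvScan ch = (if pvCnt "failed" ch > 0 then none else some (pvCnt "degraded" ch, pvCnt "healthy" ch)) := by
  induction ch with
  | nil => simp [pvScan, pvCnt]
  | cons c rest ih =>
    have hf := pvCnt_nonneg "failed" rest
    simp only [pvScan, ih]
    have hcnt : ∀ s, pvCnt s (c :: rest) = (if pvStatus c.2 == some s then (1:Int) else 0) + pvCnt s rest := by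
      intro s; simp [pvCnt]
    rw [hcnt "failed", hcnt "degraded", hcnt "healthy"]
    by_cases h1 : pvStatus c.2 = some "failed"
    · simp [h1]; omega
    · by_cases h2 : pvStatus c.2 = some "degraded"
      · simp [h2] at *
        split <;> simp_all <;> ring
      · by_cases h3 : pvStatus c.2 = some "healthy"
        · simp [h3] at *
          split <;> simp_all <;> ring
        · simp [h1, h2, h3] at *
          split <;> simp_all

-- ===== VERDICT (by name: the statement is the Claim_ definition above) =====
theorem determine_overall_status_py_spec : Claim_equal_determine_overall_status_py := by
  intro ch ph _
  unfold Spec_determine_overall_status_py determine_overall_status_py determine_overall_status_py_alt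
  rw [pvScan_spec]
  show (if pvCnt "failed" ch > 0 then _ else _) = _
  have hf := pvCnt_nonneg "failed" ch
  by_cases h : pvCnt "failed" ch > 0
  · simp [h]
  · simp only [h, if_false]
    cases hp : PySem.Dict.getD (PySem.Dict.mk ph) "healthy" false with
    | false => simp
    | true =>
      have fold : ∀ s, (List.map (fun c => if pvStatus c.2 = some s then (1:Int) else 0) ch).sum = pvCnt s ch := fun s => by simp [pvCnt]
      by_cases hd : pvCnt "degraded" ch = 0
      · simp [fold, hd]
      · simp [fold, hd]
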